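-- pv_equiv track=rewrite | github.com/takeharukato/ansibleConfigGenerator | src/genAnsibleConf/lib/user_merge.py | merge_users_list
-- ===== SOURCE A (Python) =====
-- from typing import Any, cast
--
-- def merge_users_list(
--     global_users: Any,
--     node_users: Any,
-- ) -> list[dict[str, Any]]:
--     """`users_list` をグローバル定義とノード定義でマージする。
--
--     Args:
--         global_users (Any): グローバルの users_list 値である。
--         node_users (Any): ノードの users_list 値である。
--
--     Returns:
--         list[dict[str, Any]]: `name` キーで統合した users_list である。
--
--     Examples:
--         >>> merge_users_list([{"name": "alice", "uid": 1000}], [{"name": "alice", "shell": "/bin/bash"}])[0]["shell"]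
--         '/bin/bash'
--     """
--     merged: dict[str, dict[str, Any]] = {}
--     order: list[str] = []
--
--     for source in (global_users, node_users):
--         if not isinstance(source, list):
--             continue
--         source_list: list[Any] = cast(list[Any], source)
--         for entry_raw in source_list:
--             if not isinstance(entry_raw, dict):
--                 continue
--             entry_map: dict[Any, Any] = cast(dict[Any, Any], entry_raw)
--             entry: dict[str, Any] = dict(entry_map)
--             name: Any = entry.get('name')
--             if not isinstance(name, str) or not name:
--                 continue
--             if name not in merged:
--                 order.append(name)
--                 merged[name] = entry
--             else:
--                 merged[name].update(entry)
--
--     return [merged[name] for name in order]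
-- ===== SOURCE B (Python) =====
-- from typing import Any, cast
--
--
-- def merge_users_list(
--     global_users: Any,
--     node_users: Any,
-- ) -> list[dict[str, Any]]:
--     """Merge users_list by name: build a name->group index, then reduce each group."""
--     index: dict[str, list[dict[str, Any]]] = {}
--     for source in (global_users, node_users):
--         if not isinstance(source, list):
--             continue
--         for entry_raw in cast(list[Any], source):
--             if not isinstance(entry_raw, dict):
--                 continue
--             name = cast(dict[Any, Any], entry_raw).get('name')
--             if not isinstance(name, str) or not name:
--                 continue
--             index.setdefault(name, []).append(dict(cast(dict[Any, Any], entry_raw)))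
--     result: list[dict[str, Any]] = []
--     for group in index.values():
--         merged = dict(group[0])
--         for entry in group[1:]:
--             merged.update(entry)
--         result.append(merged)
--     return result
-- ===== Notes on version B (the rewrite author's own statement) =====
-- stated objective: alternative
-- what changed: Replaces A's single incremental insert-or-update loop over a merged dict with a two-phase shape: first build an order-preserving name -> list-of-entries index (setdefault/append), then reduce each group to one dict by copying the first entry and applying update for the rest.
import Mathlib
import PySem

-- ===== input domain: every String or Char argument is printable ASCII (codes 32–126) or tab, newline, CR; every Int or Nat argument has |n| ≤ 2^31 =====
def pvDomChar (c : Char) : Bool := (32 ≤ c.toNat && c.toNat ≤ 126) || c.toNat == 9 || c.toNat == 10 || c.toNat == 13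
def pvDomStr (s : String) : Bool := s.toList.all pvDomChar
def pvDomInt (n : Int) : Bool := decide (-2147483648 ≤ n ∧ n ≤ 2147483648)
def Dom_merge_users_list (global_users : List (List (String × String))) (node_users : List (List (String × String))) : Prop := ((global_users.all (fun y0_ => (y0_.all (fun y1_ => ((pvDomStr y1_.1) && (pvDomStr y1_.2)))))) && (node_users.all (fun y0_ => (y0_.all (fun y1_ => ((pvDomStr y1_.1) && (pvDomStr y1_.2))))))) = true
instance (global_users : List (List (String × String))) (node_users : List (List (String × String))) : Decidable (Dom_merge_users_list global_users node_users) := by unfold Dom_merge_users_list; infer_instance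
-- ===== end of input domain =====

-- B rebuilds A's merge as: build a name -> group index, then reduce each group (alternative decomposition, same cost).

-- ===== PORT A =====
-- A's loop state: (merged : dict name -> merged entry-dict, order : list of first-seen names).
-- The isinstance(source, list) / isinstance(entry_raw, dict) / isinstance(name, str) guards are
-- always true under the Lean types, so they vanish; 'not name' on a str is the emptiness test.
def mergeStepA (st : PySem.Dict String (PySem.Dict String String) × List String)
    (entry_raw : List (String × String)) :
    PySem.Dict String (PySem.Dict String String) × List String :=
  let entry := PySem.Dict.ofList entry_raw      -- entry = dict(entry_map)
  match entry.get? "name" with                  -- name = entry.get('name')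
  | none => st
  | some name =>
      if name = "" then st
      else if st.1.contains name then
        -- merged[name].update(entry)  (in-place: key position kept)
        (st.1.modify name PySem.Dict.empty (fun d => d.update entry.items), st.2)
      else
        -- order.append(name); merged[name] = entry
        (st.1.insert name entry, st.2 ++ [name])

def merge_users_list (global_users : List (List (String × String))) (node_users : List (List (String × String))) : List (List (String × String)) :=
  let st := [global_users, node_users].foldl
      (fun st source => source.foldl mergeStepA st) (PySem.Dict.empty, [])
  st.2.map (fun name => (st.1.getD name PySem.Dict.empty).items)

-- ===== PORT B =====
-- First pass: index.setdefault(name, []).append(dict(entry_raw))  (modify with append = setdefault+append).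
def altIndexStep (idx : PySem.Dict String (List (PySem.Dict String String)))
    (entry_raw : List (String × String)) :
    PySem.Dict String (List (PySem.Dict String String)) :=
  let d := PySem.Dict.ofList entry_raw
  match d.get? "name" with
  | none => idx
  | some name =>
      if name = "" then idx
      else idx.modify name [] (fun g => g ++ [d])

-- Second pass reducer: merged = dict(group[0]); for e in group[1:]: merged.update(e).
def altReduce (g : List (PySem.Dict String String)) : PySem.Dict String String :=
  match g with
  | [] => PySem.Dict.empty          -- unreachable: every stored group is nonempty
  | first :: rest => rest.foldl (fun m e => m.update e.items) first

def merge_users_list_alt (global_users : List (List (String × String))) (node_users : List (List (String × String))) : List (List (String × String)) :=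
  let idx := [global_users, node_users].foldl
      (fun idx source => source.foldl altIndexStep idx) PySem.Dict.empty
  idx.items.map (fun p => (altReduce p.2).items)

-- ===== PRECONDITION & SPEC =====
def Spec_merge_users_list (global_users : List (List (String × String))) (node_users : List (List (String × String))) (out : List (List (String × String))) : Prop := out = merge_users_list_alt global_users node_users
instance (global_users : List (List (String × String))) (node_users : List (List (String × String))) (out : List (List (String × String))) : Decidable (Spec_merge_users_list global_users node_users out) := by unfold Spec_merge_users_list; infer_instance

-- ===== CLAIM (what is proved, stated in full; the proofs are below) =====
def Claim_equal_merge_users_list : Prop := ∀ (global_users : List (List (String × String))) (node_users : List (List (String × String))), Dom_merge_users_list global_users node_users → Spec_merge_users_list global_users node_users (merge_users_list global_users node_users)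

-- ===== LEMMAS AND PROOFS =====

-- Invariant linking A's (merged, order) to B's index after processing the same entries.
def MergeInv (mA : PySem.Dict String (PySem.Dict String String)) (ord : List String)
    (idx : PySem.Dict String (List (PySem.Dict String String))) : Prop :=
  idx.keys = ord ∧ idx.keys.Nodup ∧
  (∀ n, mA.contains n = idx.contains n) ∧
  (∀ n, altReduce (idx.getD n []) = mA.getD n PySem.Dict.empty) ∧
  (∀ n, idx.contains n = true → idx.getD n [] ≠ [])

theorem altReduce_append (g : List (PySem.Dict String String)) (e : PySem.Dict String String)
    (h : g ≠ []) : altReduce (g ++ [e]) = (altReduce g).update e.items := by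
  match g with
  | [] => exact absurd rfl h
  | f :: r => simp [altReduce, List.foldl_append]

theorem mergeInv_step (st : PySem.Dict String (PySem.Dict String String) × List String)
    (idx : PySem.Dict String (List (PySem.Dict String String)))
    (e : List (String × String)) (h : MergeInv st.1 st.2 idx) :
    MergeInv (mergeStepA st e).1 (mergeStepA st e).2 (altIndexStep idx e) := by
  obtain ⟨hk, hnd, hc, hg, hne⟩ := h
  unfold mergeStepA altIndexStep
  cases hname : (PySem.Dict.ofList e).get? "name" with
  | none => simp only [hname]; exact ⟨hk, hnd, hc, hg, hne⟩
  | some name =>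
    simp only [hname]
    by_cases hemp : name = ""
    · rw [if_pos hemp, if_pos hemp]; exact ⟨hk, hnd, hc, hg, hne⟩
    · rw [if_neg hemp, if_neg hemp]
      by_cases hmem : st.1.contains name = true
      · -- existing key: A updates in place, B appends to the group
        rw [if_pos hmem]
        have hidxc : idx.contains name = true := (hc name) ▸ hmem
        refine ⟨?_, ?_, ?_, ?_, ?_⟩
        · rw [PySem.Dict.keys_modify, PySem.Dict.keys_insert_of_contains _ _ hidxc, hk]
        · rw [PySem.Dict.keys_modify, PySem.Dict.keys_insert_of_contains _ _ hidxc]; exact hnd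
        · intro n
          rw [PySem.Dict.contains_modify, PySem.Dict.contains_modify, hc n]
        · intro n
          rw [PySem.Dict.getD_modify, PySem.Dict.getD_modify]
          by_cases hn : n = name
          · simp only [if_pos hn]
            rw [altReduce_append _ _ (hne name hidxc), hg name]
          · simp only [if_neg hn]; exact hg n
        · intro n hcn
          rw [PySem.Dict.getD_modify]
          by_cases hn : n = name
          · simp [hn]
          · simp only [if_neg hn]
            rw [PySem.Dict.contains_modify] at hcn
            have : idx.contains n = true := by
              cases h' : idx.contains n with
              | true => rfl
              | false => simp [h', show (n == name) = false by simp [hn]] at hcn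
            exact hne n this
      · -- new key: A inserts, B starts a fresh one-element group
        rw [if_neg hmem]
        have hidxc : idx.contains name = false := by
          have := hc name
          cases h' : idx.contains name with
          | false => rfl
          | true => rw [h'] at this; exact absurd this hmem
        have hnk : name ∉ idx.keys := by
          intro hmemk
          rw [← PySem.Dict.contains_iff_mem_keys] at hmemk
          simp [hidxc] at hmemk
        refine ⟨?_, ?_, ?_, ?_, ?_⟩
        · rw [PySem.Dict.keys_modify, PySem.Dict.keys_insert_of_not_contains _ _ hidxc, hk]
        · rw [PySem.Dict.keys_modify, PySem.Dict.keys_insert_of_not_contains _ _ hidxc]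
          exact List.Nodup.append hnd (List.nodup_singleton _)
            (by simpa [List.disjoint_singleton] using hnk)
        · intro n
          rw [PySem.Dict.contains_insert, PySem.Dict.contains_modify, hc n]
        · intro n
          rw [PySem.Dict.getD_modify, PySem.Dict.getD_insert]
          by_cases hn : n = name
          · have hnil : idx.getD name [] = [] :=
              PySem.Dict.getD_of_not_contains _ _ hidxc
            simp [hn, hnil, altReduce]
          · simp only [if_neg hn]; exact hg n
        · intro n hcn
          rw [PySem.Dict.getD_modify]
          by_cases hn : n = name
          · simp [hn, PySem.Dict.getD_of_not_contains _ _ hidxc]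
          · simp only [if_neg hn]
            rw [PySem.Dict.contains_modify] at hcn
            have : idx.contains n = true := by
              cases h' : idx.contains n with
              | true => rfl
              | false => simp [h', show (n == name) = false by simp [hn]] at hcn
            exact hne n this

theorem mergeInv_foldl (es : List (List (String × String)))
    (st : PySem.Dict String (PySem.Dict String String) × List String)
    (idx : PySem.Dict String (List (PySem.Dict String String)))
    (h : MergeInv st.1 st.2 idx) :
    MergeInv (es.foldl mergeStepA st).1 (es.foldl mergeStepA st).2
      (es.foldl altIndexStep idx) := by
  induction es generalizing st idx with
  | nil => exact h
  | cons e es ih => exact ih _ _ (mergeInv_step st idx e h)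

-- ===== VERDICT (by name: the statement is the Claim_ definition above) =====
theorem merge_users_list_spec : Claim_equal_merge_users_list := by
  intro g n _
  unfold Spec_merge_users_list merge_users_list merge_users_list_alt
  simp only [List.foldl_cons, List.foldl_nil]
  have h0 : MergeInv ((PySem.Dict.empty : PySem.Dict String (PySem.Dict String String)), ([] : List String)).1
      ((PySem.Dict.empty : PySem.Dict String (PySem.Dict String String)), ([] : List String)).2
      (PySem.Dict.empty (κ := String) (ν := List (PySem.Dict String String))) := by
    refine ⟨rfl, List.nodup_nil, fun _ => rfl, fun _ => rfl, fun m h => ?_⟩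
    simp [PySem.Dict.contains_empty] at h
  have h1 := mergeInv_foldl g _ _ h0
  have h2 := mergeInv_foldl n _ _ h1
  obtain ⟨hk, hnd, _, hgD, _⟩ := h2
  rw [PySem.Dict.items_eq_map_keys _ hnd [], List.map_map, hk]
  exact (List.map_congr_left (fun m _ => by simp [hgD m])).symm
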